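-- pv_equiv track=rewrite | github.com/quann169/SVI_Smartsheet | Smartsheet/src/svi/utils/Util.py | check_string_content_string
-- ===== SOURCE A (Python) =====
-- def check_string_content_string(list_key_define_real_proj , string, list_key_define_rnd_proj, list_key_define_pre_sale_proj, list_key_define_post_sale_proj):
--     result = 0
--     if len(list_key_define_real_proj):
--         for elm in list_key_define_real_proj:
--             index = elm.find('*')
--             if index == -1:
--                 if elm == string:
--                     result = 1
--                     break
--             else:
--                 text = elm[:index]
--                 if string.startswith(text):
--                     result = 1
--                     break
--     else:
--         result = 1
--     if not result:
--         if len(list_key_define_rnd_proj):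
--             for elm in list_key_define_rnd_proj:
--                 index = elm.find('*')
--                 if index == -1:
--                     if elm == string:
--                         result = 3
--                         break
--                 else:
--                     text = elm[:index]
--                     if string.startswith(text):
--                         result = 3
--                         break
--         else:
--             result = 3
--     if not result:
--         if len(list_key_define_pre_sale_proj):
--             for elm in list_key_define_pre_sale_proj:
--                 index = elm.find('*')
--                 if index == -1:
--                     if elm == string:
--                         result = 4
--                         break
--                 else:
--                     text = elm[:index]
--                     if string.startswith(text):
--                         result = 4
--                         break
--         else:
--             result = 4
--     if not result:
--         if len(list_key_define_post_sale_proj):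
--             for elm in list_key_define_post_sale_proj:
--                 index = elm.find('*')
--                 if index == -1:
--                     if elm == string:
--                         result = 5
--                         break
--                 else:
--                     text = elm[:index]
--                     if string.startswith(text):
--                         result = 5
--                         break
--         else:
--             result = 5
--     return result
-- ===== SOURCE B (Python) =====
-- def check_string_content_string(list_key_define_real_proj, string, list_key_define_rnd_proj, list_key_define_pre_sale_proj, list_key_define_post_sale_proj):
--     # Collect every matching code (an empty list matches by itself; a key matches
--     # exactly, or by prefix up to its first '*') and return the smallest, default 0.
--     # Correct because A's priority order 1,3,4,5 is ascending numeric order.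
--     table = ((1, list_key_define_real_proj), (3, list_key_define_rnd_proj),
--              (4, list_key_define_pre_sale_proj), (5, list_key_define_post_sale_proj))
--     hits = [code for code, keys in table if not keys]
--     hits += [code for code, keys in table for elm in keys
--              if (string.startswith(elm[:elm.find('*')]) if '*' in elm else string == elm)]
--     return min(hits, default=0)
-- ===== Notes on version B (the rewrite author's own statement) =====
-- stated objective: alternative
-- what changed: Instead of A's ordered early-exit priority scan over four copy-pasted blocks, B gathers every matching code in one exhaustive comprehension pass (empty lists and matching keys each contribute their list's code) and returns the minimum with default 0, which equals the first match because the codes 1,3,4,5 ascend.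
import Mathlib
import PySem

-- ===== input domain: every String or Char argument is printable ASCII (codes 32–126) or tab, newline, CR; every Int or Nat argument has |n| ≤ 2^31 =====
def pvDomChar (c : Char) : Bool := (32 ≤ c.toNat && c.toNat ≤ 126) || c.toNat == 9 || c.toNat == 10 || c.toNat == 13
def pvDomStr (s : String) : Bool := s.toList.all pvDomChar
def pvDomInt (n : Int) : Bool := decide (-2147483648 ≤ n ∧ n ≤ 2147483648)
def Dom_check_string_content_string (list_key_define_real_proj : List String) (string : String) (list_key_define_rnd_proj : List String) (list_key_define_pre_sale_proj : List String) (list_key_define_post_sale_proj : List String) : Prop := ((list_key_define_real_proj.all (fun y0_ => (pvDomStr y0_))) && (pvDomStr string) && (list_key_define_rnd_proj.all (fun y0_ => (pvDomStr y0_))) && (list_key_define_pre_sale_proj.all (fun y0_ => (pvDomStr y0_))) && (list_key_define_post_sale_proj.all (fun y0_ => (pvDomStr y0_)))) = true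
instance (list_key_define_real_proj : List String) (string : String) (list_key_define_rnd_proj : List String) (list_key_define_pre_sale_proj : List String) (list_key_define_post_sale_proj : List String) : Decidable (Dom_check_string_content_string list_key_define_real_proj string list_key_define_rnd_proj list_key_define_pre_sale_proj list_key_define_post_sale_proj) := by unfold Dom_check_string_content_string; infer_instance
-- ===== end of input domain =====

-- B replaces A's ordered early-exit priority scan by one exhaustive pass that collects every
-- matching code and returns the minimum (default 0); equal because the codes 1,3,4,5 ascend.


-- ===== PORT A =====
-- A's four loops are textually identical; each is this loop, transliterated step for step.
def pvScan (keys : List String) (string : String) (code : Int) : Int :=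
  match keys with
  | [] => 0
  | elm :: rest =>
    let index := PySem.Str.find elm "*"
    if index == -1 then
      if elm == string then code else pvScan rest string code
    else
      let text := PySem.Str.slice elm none (some index)
      if PySem.Str.startswith string text then code else pvScan rest string code

def check_string_content_string (list_key_define_real_proj : List String) (string : String) (list_key_define_rnd_proj : List String) (list_key_define_pre_sale_proj : List String) (list_key_define_post_sale_proj : List String) : Int :=
  let result : Int :=
    if list_key_define_real_proj.length ≠ 0 then pvScan list_key_define_real_proj string 1 else 1
  let result : Int :=
    if result == 0 then
      (if list_key_define_rnd_proj.length ≠ 0 then pvScan list_key_define_rnd_proj string 3 else 3)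
    else result
  let result : Int :=
    if result == 0 then
      (if list_key_define_pre_sale_proj.length ≠ 0 then pvScan list_key_define_pre_sale_proj string 4 else 4)
    else result
  let result : Int :=
    if result == 0 then
      (if list_key_define_post_sale_proj.length ≠ 0 then pvScan list_key_define_post_sale_proj string 5 else 5)
    else result
  result

-- ===== PORT B =====
-- B: per-key test of Source B's comprehension filter (prefix up to the first '*' when the key
-- contains '*', exact equality otherwise).
def pvHit (string elm : String) : Bool :=
  if PySem.Str.isIn "*" elm then
    PySem.Str.startswith string (PySem.Str.slice elm none (some (PySem.Str.find elm "*")))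
  else string == elm

def check_string_content_string_alt (list_key_define_real_proj : List String) (string : String) (list_key_define_rnd_proj : List String) (list_key_define_pre_sale_proj : List String) (list_key_define_post_sale_proj : List String) : Int :=
  let table : List (Int × List String) :=
    [(1, list_key_define_real_proj), (3, list_key_define_rnd_proj),
     (4, list_key_define_pre_sale_proj), (5, list_key_define_post_sale_proj)]
  let hits := (table.filter (fun p => p.2.isEmpty)).map Prod.fst
  let hits := hits ++ table.flatMap (fun p => (p.2.filter (fun elm => pvHit string elm)).map (fun _ => p.1))
  (PySem.List.min? hits (fun x => x)).getD 0

-- ===== PRECONDITION & SPEC =====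
def Spec_check_string_content_string (list_key_define_real_proj : List String) (string : String) (list_key_define_rnd_proj : List String) (list_key_define_pre_sale_proj : List String) (list_key_define_post_sale_proj : List String) (out : Int) : Prop := out = check_string_content_string_alt list_key_define_real_proj string list_key_define_rnd_proj list_key_define_pre_sale_proj list_key_define_post_sale_proj
instance (list_key_define_real_proj : List String) (string : String) (list_key_define_rnd_proj : List String) (list_key_define_pre_sale_proj : List String) (list_key_define_post_sale_proj : List String) (out : Int) : Decidable (Spec_check_string_content_string list_key_define_real_proj string list_key_define_rnd_proj list_key_define_pre_sale_proj list_key_define_post_sale_proj out) := by unfold Spec_check_string_content_string; infer_instance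

-- ===== CLAIM (what is proved, stated in full; the proofs are below) =====
def Claim_equal_check_string_content_string : Prop := ∀ (list_key_define_real_proj : List String) (string : String) (list_key_define_rnd_proj : List String) (list_key_define_pre_sale_proj : List String) (list_key_define_post_sale_proj : List String), Dom_check_string_content_string list_key_define_real_proj string list_key_define_rnd_proj list_key_define_pre_sale_proj list_key_define_post_sale_proj → Spec_check_string_content_string list_key_define_real_proj string list_key_define_rnd_proj list_key_define_pre_sale_proj list_key_define_post_sale_proj (check_string_content_string list_key_define_real_proj string list_key_define_rnd_proj list_key_define_pre_sale_proj list_key_define_post_sale_proj)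

-- ===== LEMMAS AND PROOFS =====

-- whether a whole list "matches" (empty, or some key hits)
def pvM (keys : List String) (string : String) : Bool :=
  keys.isEmpty || keys.any (fun elm => pvHit string elm)

-- A's per-element test equals B's pvHit.
theorem pred_eq (string elm : String) :
    (if PySem.Str.find elm "*" == -1 then elm == string
     else PySem.Str.startswith string (PySem.Str.slice elm none (some (PySem.Str.find elm "*")))) =
    pvHit string elm := by
  unfold pvHit
  by_cases h : "*".toList <:+: elm.toList
  · have h1 : PySem.Str.isIn "*" elm = true := (PySem.Str.isIn_iff_infix "*" elm).mpr h
    have h2 : (PySem.Str.find elm "*" == -1) = false :=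
      beq_eq_false_iff_ne.mpr ((PySem.Str.find_ne_neg_one_iff elm "*").mpr h)
    rw [h2, h1]; simp
  · have h1 : PySem.Str.isIn "*" elm = false := by
      cases hb : PySem.Str.isIn "*" elm
      · rfl
      · exact absurd ((PySem.Str.isIn_iff_infix "*" elm).mp hb) h
    have h2 : PySem.Str.find elm "*" = -1 := (PySem.Str.find_eq_neg_one_iff elm "*").mpr h
    rw [h2, h1]
    simp only [beq_self_eq_true, if_true, Bool.false_eq_true, if_false]
    cases h3 : (elm == string) <;> cases h4 : (string == elm) <;> simp_all

-- A's loop returns code iff some element hits.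
theorem pvScan_eq (keys : List String) (string : String) (code : Int) :
    pvScan keys string code =
      (if keys.any (fun elm => pvHit string elm) then code else 0) := by
  induction keys with
  | nil => simp [pvScan]
  | cons elm rest ih =>
    simp only [pvScan, List.any_cons, Bool.or_eq_true, ih, ← pred_eq string elm]
    split_ifs <;> simp_all <;>
      (rename_i hall hex; obtain ⟨x, hx, hpx⟩ := hex; have hf := hall x hx; simp [hf] at hpx)

-- A's whole block (empty list counts as a match) in terms of pvM.
theorem block_eq (keys : List String) (string : String) (code : Int) :
    (if keys.length ≠ 0 then pvScan keys string code else code) =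
      (if pvM keys string then code else 0) := by
  by_cases h : keys.length = 0
  · have : keys = [] := List.length_eq_zero_iff.mp h
    simp [this, pvM]
  · have hk : keys.isEmpty = false := by
      cases keys <;> simp_all
    simp [pvM, h, hk, pvScan_eq]

-- membership in B's hits list
theorem mem_hits (l1 l2 l3 l4 : List String) (string : String) (c : Int) :
    (c ∈ ((([(1, l1), (3, l2), (4, l3), (5, l4)] : List (Int × List String)).filter
            (fun p => p.2.isEmpty)).map Prod.fst ++
          ([(1, l1), (3, l2), (4, l3), (5, l4)] : List (Int × List String)).flatMap
            (fun p => (p.2.filter (fun elm => pvHit string elm)).map (fun _ => p.1)))) ↔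
      ((c = 1 ∧ pvM l1 string) ∨ (c = 3 ∧ pvM l2 string) ∨
       (c = 4 ∧ pvM l3 string) ∨ (c = 5 ∧ pvM l4 string)) := by
  simp [List.mem_append, List.mem_filter, List.mem_map, pvM,
    List.any_eq_true, List.isEmpty_iff]
  generalize (c = 1) = P1
  generalize (c = 3) = P2
  generalize (c = 4) = P3
  generalize (c = 5) = P4
  generalize (l1 = []) = E1
  generalize (l2 = []) = E2
  generalize (l3 = []) = E3
  generalize (l4 = []) = E4
  generalize (∃ x ∈ l1, pvHit string x = true) = X1
  generalize (∃ x ∈ l2, pvHit string x = true) = X2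
  generalize (∃ x ∈ l3, pvHit string x = true) = X3
  generalize (∃ x ∈ l4, pvHit string x = true) = X4
  tauto

-- min with default of a list containing its lower bound
theorem min_getD_eq (l : List Int) (a : Int) (ha : a ∈ l) (h : ∀ c ∈ l, a ≤ c) :
    (PySem.List.min? l (fun x => x)).getD 0 = a := by
  cases hm : PySem.List.min? l (fun x => x) with
  | none =>
    rw [PySem.List.min?_eq_none_iff] at hm
    subst hm; cases ha
  | some m =>
    have h1 := PySem.List.min?_mem hm
    have h2 := PySem.List.min?_isMin hm a ha
    have h3 := h m h1
    simp only [Option.getD_some]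
    omega

theorem min_getD_empty (l : List Int) (h : l = []) :
    (PySem.List.min? l (fun x => x)).getD 0 = 0 := by
  subst h; simp [PySem.List.min?]

-- ===== VERDICT =====
theorem check_string_content_string_spec : Claim_equal_check_string_content_string := by
  intro l1 s l2 l3 l4 _
  unfold Spec_check_string_content_string check_string_content_string check_string_content_string_alt
  simp only [block_eq]
  by_cases h1 : pvM l1 s = true <;> by_cases h2 : pvM l2 s = true <;>
    by_cases h3 : pvM l3 s = true <;> by_cases h4 : pvM l4 s = true <;>
    simp only [h1, h2, h3, h4, if_true, Bool.false_eq_true, if_false] <;>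
    first
      | (refine Eq.trans ?_ (min_getD_eq _ 1 ((mem_hits l1 l2 l3 l4 s 1).mpr (Or.inl ⟨rfl, h1⟩)) ?_).symm
         · norm_num
         · intro c hc
           rcases (mem_hits l1 l2 l3 l4 s c).mp hc with ⟨e, hm⟩ | ⟨e, hm⟩ | ⟨e, hm⟩ | ⟨e, hm⟩ <;> omega)
      | (refine Eq.trans ?_ (min_getD_eq _ 3 ((mem_hits l1 l2 l3 l4 s 3).mpr (Or.inr (Or.inl ⟨rfl, h2⟩))) ?_).symm
         · norm_num
         · intro c hc
           rcases (mem_hits l1 l2 l3 l4 s c).mp hc with ⟨e, hm⟩ | ⟨e, hm⟩ | ⟨e, hm⟩ | ⟨e, hm⟩ <;>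
             first | (exact absurd hm h1) | omega)
      | (refine Eq.trans ?_ (min_getD_eq _ 4 ((mem_hits l1 l2 l3 l4 s 4).mpr (Or.inr (Or.inr (Or.inl ⟨rfl, h3⟩)))) ?_).symm
         · norm_num
         · intro c hc
           rcases (mem_hits l1 l2 l3 l4 s c).mp hc with ⟨e, hm⟩ | ⟨e, hm⟩ | ⟨e, hm⟩ | ⟨e, hm⟩ <;>
             first | (exact absurd hm h1) | (exact absurd hm h2) | omega)
      | (refine Eq.trans ?_ (min_getD_eq _ 5 ((mem_hits l1 l2 l3 l4 s 5).mpr (Or.inr (Or.inr (Or.inr ⟨rfl, h4⟩)))) ?_).symm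
         · norm_num
         · intro c hc
           rcases (mem_hits l1 l2 l3 l4 s c).mp hc with ⟨e, hm⟩ | ⟨e, hm⟩ | ⟨e, hm⟩ | ⟨e, hm⟩ <;>
             first | (exact absurd hm h1) | (exact absurd hm h2) | (exact absurd hm h3) | omega)
      | (refine Eq.trans ?_ (min_getD_empty _ ?_).symm
         · norm_num
         · rw [List.eq_nil_iff_forall_not_mem]
           intro c hc
           rcases (mem_hits l1 l2 l3 l4 s c).mp hc with ⟨e, hm⟩ | ⟨e, hm⟩ | ⟨e, hm⟩ | ⟨e, hm⟩ <;>
             first | (exact absurd hm h1) | (exact absurd hm h2) | (exact absurd hm h3) | (exact absurd hm h4))
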